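-- pv_equiv track=rewrite | github.com/DPDominika/memory_game | helpers.py | calc_pair_divisors
-- ===== SOURCE A (Python) =====
-- def calc_pair_divisors(all_divisors):
--     unique_divisors = all_divisors[:]
--     while len(unique_divisors) > 2:
--         max_value = max(unique_divisors)
--         min_value = min(unique_divisors)
--         unique_divisors.remove(max_value)
--         unique_divisors.remove(min_value)
--         if len(unique_divisors) == 1:
--             return 2*unique_divisors
--         elif len(unique_divisors) == 2:
--             return unique_divisors
-- ===== SOURCE B (Python) =====
-- def calc_pair_divisors(all_divisors):
--     n = len(all_divisors)
--     if n < 3: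
--         return None
--     s = sorted(all_divisors)
--     k = (n - 1) // 2
--     mid = s[k:n - k]
--     quota = {}
--     for v in mid:
--         quota[v] = quota.get(v, 0) + 1
--     out = []
--     for v in reversed(all_divisors):
--         if quota.get(v, 0) > 0:
--             quota[v] = quota.get(v, 0) - 1
--             out.append(v)
--     out.reverse()
--     return 2 * out if len(out) == 1 else out
-- ===== Notes on version B (the rewrite author's own statement) =====
-- stated objective: faster
-- what changed: A repeatedly scans the list for max and min and removes them pairwise (O(n^2)); B sorts once, counts the values of the 1-2 middle ranks, and selects the last occurrences of those values in a single reverse pass (O(n log n)).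
import Mathlib
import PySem

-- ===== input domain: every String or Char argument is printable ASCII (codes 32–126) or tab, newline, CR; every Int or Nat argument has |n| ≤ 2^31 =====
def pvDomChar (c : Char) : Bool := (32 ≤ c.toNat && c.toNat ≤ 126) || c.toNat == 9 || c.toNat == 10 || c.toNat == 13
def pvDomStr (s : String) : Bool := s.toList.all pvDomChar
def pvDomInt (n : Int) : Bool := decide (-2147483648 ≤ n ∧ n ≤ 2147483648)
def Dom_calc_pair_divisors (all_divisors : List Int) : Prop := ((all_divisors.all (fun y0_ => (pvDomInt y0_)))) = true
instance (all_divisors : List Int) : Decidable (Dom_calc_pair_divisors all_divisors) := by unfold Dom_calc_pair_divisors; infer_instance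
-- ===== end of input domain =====

-- B is an O(n log n) re-implementation: sort once, read off the middle ranks' value counts,
-- then keep the last occurrences of those values in one reverse pass (A repeatedly removes max/min, O(n^2)).

-- ===== PORT A =====
-- termination helper for the while-loop: a successful remove() shortens the list by one
theorem pv_remove?_length {xs ys : List Int} {v : Int}
    (h : PySem.List.remove? xs v = some ys) : ys.length + 1 = xs.length := by
  have hv : v ∈ xs := by
    by_contra hv
    rw [(PySem.List.remove?_eq_none_iff xs v).mpr hv] at h
    cases h
  rw [PySem.List.remove?_eq_some_erase xs v hv] at h
  obtain rfl := Option.some.inj h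
  have h1 := List.length_erase_of_mem hv
  have h2 := List.length_pos_of_mem hv
  omega

-- the while-loop of A
def calcPairLoop (l : List Int) : Option (List Int) :=
  if l.length > 2 then
    match PySem.List.max? l (fun x => x) with
    | none => none
    | some max_value =>
      match PySem.List.min? l (fun x => x) with
      | none => none
      | some min_value =>
        match h1 : PySem.List.remove? l max_value with
        | none => none
        | some l1 =>
          match h2 : PySem.List.remove? l1 min_value with
          | none => none
          | some l2 =>
            if l2.length = 1 then some (l2 ++ l2)
            else if l2.length = 2 then some l2
            else calcPairLoop l2
  else none
termination_by l.length
decreasing_by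
  have e1 := pv_remove?_length h1
  have e2 := pv_remove?_length h2
  omega

def calc_pair_divisors (all_divisors : List Int) : Option (List Int) :=
  calcPairLoop all_divisors

-- ===== PORT B =====
def calc_pair_divisors_alt (all_divisors : List Int) : Option (List Int) :=
  let n : Int := PySem.List.len all_divisors
  if n < 3 then none
  else
    let s := PySem.List.sorted all_divisors (fun x => x)
    let k := PySem.Int.floordiv (n - 1) 2
    let mid := PySem.List.slice s (some k) (some (n - k))
    let quota := mid.foldl (fun d v => d.insert v (d.getD v 0 + 1)) PySem.Dict.empty
    let p := all_divisors.reverse.foldl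
      (fun (st : PySem.Dict Int Int × List Int) v =>
        if st.1.getD v 0 > 0 then (st.1.insert v (st.1.getD v 0 - 1), st.2 ++ [v])
        else st)
      (quota, [])
    let out := p.2.reverse
    if out.length = 1 then some (out ++ out) else some out

-- ===== PRECONDITION & SPEC =====
def Spec_calc_pair_divisors (all_divisors : List Int) (out : Option (List Int)) : Prop := out = calc_pair_divisors_alt all_divisors
instance (all_divisors : List Int) (out : Option (List Int)) : Decidable (Spec_calc_pair_divisors all_divisors out) := by unfold Spec_calc_pair_divisors; infer_instance

-- ===== CLAIM (what is proved, stated in full; the proofs are below) =====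
def Claim_equal_calc_pair_divisors : Prop := ∀ (all_divisors : List Int), Dom_calc_pair_divisors all_divisors → Spec_calc_pair_divisors all_divisors (calc_pair_divisors all_divisors)

-- ===== LEMMAS AND PROOFS =====

-- c with its value at v decremented
def pvUpd (c : Int → Int) (v : Int) : Int → Int := fun u => if u = v then c v - 1 else c u

-- keep, for each value v, the LAST (c v) occurrences of v (left-to-right formulation)
def pvKeepQ (c : Int → Int) : List Int → List Int
  | [] => []
  | v :: t => if ((t.count v : Int) + 1) ≤ c v then v :: pvKeepQ c t else pvKeepQ c t

-- the same selection on a reversed list (what B's reverse pass computes)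
def pvRevSel (c : Int → Int) : List Int → List Int
  | [] => []
  | v :: t => if 0 < c v then v :: pvRevSel (pvUpd c v) t else pvRevSel c t

def pvCnt (m : List Int) : Int → Int := fun v => (m.count v : Int)

def pvFin (out : List Int) : List Int := if out.length = 1 then out ++ out else out

def pvMid (l : List Int) : List Int :=
  ((PySem.List.sorted l (fun x => x)).drop ((l.length - 1) / 2)).take
    (l.length - (l.length - 1) / 2 - (l.length - 1) / 2)

theorem pvKeepQ_append (c : Int → Int) (v : Int) (t : List Int) :
    pvKeepQ c (t ++ [v]) =
      if 0 < c v then pvKeepQ (pvUpd c v) t ++ [v] else pvKeepQ c t := by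
  induction t generalizing c with
  | nil =>
    simp only [List.nil_append, pvKeepQ, List.count_nil]
    split_ifs <;> first | rfl | omega
  | cons u t ih =>
    simp only [List.cons_append, pvKeepQ, ih, pvUpd, List.count_append, List.count_cons,
      List.count_nil]
    have hnn : (0 : Int) ≤ (t.count u : Int) := Int.natCast_nonneg _
    by_cases huv : u = v
    · subst huv
      simp only [beq_self_eq_true, if_true]
      push_cast
      split_ifs <;> simp_all <;> omega
    · simp only [if_neg huv, beq_iff_eq, if_neg (Ne.symm huv)]
      push_cast
      split_ifs <;> simp_all <;> omega

theorem pvRevSel_reverse (r : List Int) (c : Int → Int) :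
    (pvRevSel c r).reverse = pvKeepQ c r.reverse := by
  induction r generalizing c with
  | nil => simp [pvRevSel, pvKeepQ]
  | cons v t ih =>
    simp only [pvRevSel, List.reverse_cons]
    rw [pvKeepQ_append]
    split_ifs with h
    · simp [ih]
    · simp [ih]

theorem pvFold_eq (r : List Int) (d : PySem.Dict Int Int) (acc : List Int) (c : Int → Int)
    (h : ∀ v, d.getD v 0 = c v) :
    (r.foldl
      (fun (st : PySem.Dict Int Int × List Int) v =>
        if st.1.getD v 0 > 0 then (st.1.insert v (st.1.getD v 0 - 1), st.2 ++ [v])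
        else st)
      (d, acc)).2 = acc ++ pvRevSel c r := by
  induction r generalizing d acc c with
  | nil => simp [pvRevSel]
  | cons v t ih =>
    simp only [List.foldl_cons, pvRevSel]
    rw [h v]
    by_cases h0 : 0 < c v
    · rw [if_pos h0, if_pos h0]
      rw [ih (d.insert v (c v - 1)) (acc ++ [v]) (pvUpd c v)
        (fun u => by rw [PySem.Dict.getD_insert]; by_cases hu : u = v <;> simp [pvUpd, hu, h u])]
      simp
    · rw [if_neg h0, if_neg h0, ih d acc c h]

theorem pvKeepQ_erase (l : List Int) (v : Int) (c : Int → Int)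
    (h : c v + 1 ≤ (l.count v : Int)) :
    pvKeepQ c (l.erase v) = pvKeepQ c l := by
  induction l with
  | nil => rfl
  | cons u t ih =>
    by_cases huv : u = v
    · subst huv
      rw [List.erase_cons_head]
      have hcnt : ((u :: t).count u : Int) = (t.count u : Int) + 1 := by
        simp [List.count_cons]
      rw [hcnt] at h
      simp only [pvKeepQ]
      rw [if_neg (by omega)]
    · rw [List.erase_cons_tail (by simpa using huv)]
      simp only [pvKeepQ]
      rw [List.count_erase_of_ne huv]
      have ht : c v + 1 ≤ (t.count v : Int) := by
        rw [show List.count v (u :: t) = List.count v t from by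
          simp [List.count_cons, huv]] at h
        exact h
      rw [ih ht]

theorem pvKeepQ_all (l : List Int) (c : Int → Int)
    (h : ∀ v, (l.count v : Int) ≤ c v) : pvKeepQ c l = l := by
  induction l with
  | nil => rfl
  | cons v t ih =>
    simp only [pvKeepQ]
    rw [if_pos (by have := h v; simp [List.count_cons] at this; push_cast; omega)]
    rw [ih (fun u => by
      have h1 := h u
      have h2 : t.count u ≤ (v :: t).count u := by simp [List.count_cons]
      omega)]

theorem pvSorted_decomp (l : List Int) (mx mn : Int)
    (hmx : PySem.List.max? l (fun x => x) = some mx)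
    (hmn : PySem.List.min? l (fun x => x) = some mn)
    (h : 2 ≤ l.length) :
    ∃ u, PySem.List.sorted l (fun x => x) = mn :: u ++ [mx] := by
  have hperm := PySem.List.sorted_perm l (fun x => x) false
  have hpw := PySem.List.sorted_pairwise l (fun x => x)
  have hlen : (PySem.List.sorted l (fun x => x)).length = l.length :=
    PySem.List.length_sorted l (fun x => x) false
  obtain ⟨a, rest, hsr⟩ : ∃ a rest, PySem.List.sorted l (fun x => x) = a :: rest := by
    cases hsc : PySem.List.sorted l (fun x => x) with
    | nil => rw [hsc] at hlen; simp at hlen; omega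
    | cons a rest => exact ⟨a, rest, rfl⟩
  have hrest : rest ≠ [] := by
    intro hr
    rw [hsr, hr] at hlen
    simp at hlen
    omega
  obtain ⟨u, b, hub⟩ : ∃ u b, rest = u ++ [b] :=
    ⟨rest.dropLast, rest.getLast hrest, (List.dropLast_append_getLast hrest).symm⟩
  rw [hsr, hub] at hperm hpw
  rw [hsr, hub]
  rw [List.pairwise_cons] at hpw
  obtain ⟨ha, hpw2⟩ := hpw
  rw [List.pairwise_append] at hpw2
  obtain ⟨hpwu, -, hub2⟩ := hpw2
  -- a = mn
  have hamem : a ∈ l := hperm.mem_iff.mp (by simp)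
  have hmna : mn ≤ a := PySem.List.min?_isMin hmn a hamem
  have hans : a ≤ mn := by
    have hmem : mn ∈ a :: u ++ [b] := hperm.mem_iff.mpr (PySem.List.min?_mem hmn)
    rcases List.mem_cons.mp hmem with h' | h'
    · omega
    · exact ha mn h'
  -- b = mx
  have hbmem : b ∈ l := hperm.mem_iff.mp (by simp)
  have hbmx : b ≤ mx := PySem.List.max?_isMax hmx b hbmem
  have hmxb : mx ≤ b := by
    have hmem : mx ∈ a :: u ++ [b] := hperm.mem_iff.mpr (PySem.List.max?_mem hmx)
    rcases List.mem_cons.mp hmem with h' | h'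
    · subst h'; exact ha b (by simp)
    · rcases List.mem_append.mp h' with h'' | h''
      · exact hub2 mx h'' b (by simp)
      · simp at h''; omega
  have : a = mn := le_antisymm hans hmna
  have : b = mx := le_antisymm hbmx hmxb
  exact ⟨u, by simp_all⟩

theorem pvErase_perm (l : List Int) (mx mn : Int) (u : List Int)
    (hs : PySem.List.sorted l (fun x => x) = mn :: u ++ [mx]) :
    ((l.erase mx).erase mn).Perm u := by
  have hp : l.Perm (mn :: u ++ [mx]) := by
    have := PySem.List.sorted_perm l (fun x => x) false
    rw [hs] at this
    exact this.symm
  have h2 : ((l.erase mx).erase mn).Perm (((mn :: u ++ [mx]).erase mx).erase mn) :=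
    (hp.erase mx).erase mn
  refine h2.trans ?_
  rw [List.perm_iff_count]
  intro w
  simp only [List.count_erase, List.count_cons, List.count_append, List.count_singleton,
    List.count_nil, beq_iff_eq]
  split_ifs <;> simp_all <;> omega

theorem pvSorted_erase (l : List Int) (mx mn : Int) (u : List Int)
    (hs : PySem.List.sorted l (fun x => x) = mn :: u ++ [mx]) :
    PySem.List.sorted ((l.erase mx).erase mn) (fun x => x) = u := by
  apply PySem.List.sorted_id_eq_of_perm_of_pairwise
  · exact (pvErase_perm l mx mn u hs).symm
  · have hpw := PySem.List.sorted_pairwise l (fun x => x)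
    rw [hs] at hpw
    have hsub : u.Sublist (mn :: u ++ [mx]) :=
      ((List.sublist_append_left u [mx]).trans (List.Sublist.refl _)).cons mn
    exact hpw.sublist hsub

theorem pvMid_formula (l : List Int) (mx mn : Int) (u : List Int)
    (hs : PySem.List.sorted l (fun x => x) = mn :: u ++ [mx])
    (h : 2 < l.length) :
    pvMid l = (u.drop ((l.length - 1) / 2 - 1)).take
      (l.length - (l.length - 1) / 2 - (l.length - 1) / 2) := by
  have hu2 : u.length + 2 = l.length := by
    have := PySem.List.length_sorted l (fun x => x) false
    rw [hs] at this
    simp at this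
    omega
  unfold pvMid
  rw [hs]
  generalize hK : (l.length - 1) / 2 = K
  have hKu : K - 1 ≤ u.length := by omega
  obtain ⟨K', rfl⟩ : ∃ K', K = K' + 1 := ⟨K - 1, by omega⟩
  rw [show List.drop (K' + 1) (mn :: u ++ [mx]) = List.drop K' (u ++ [mx]) from rfl]
  rw [List.drop_append_of_le_length (by omega)]
  rw [List.take_append_of_le_length (by rw [List.length_drop]; omega)]
  simp

theorem pvLoopA_eq : ∀ (n : Nat) (l : List Int), l.length = n → 2 < n →
    calcPairLoop l = some (pvFin (pvKeepQ (pvCnt (pvMid l)) l)) := by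
  intro n
  induction n using Nat.strong_induction_on with
  | _ n IH =>
  intro l hlen hn
  subst hlen
  -- extract max and min (the list is nonempty)
  cases hmx : PySem.List.max? l (fun x => x) with
  | none =>
    rw [PySem.List.max?_eq_none_iff] at hmx
    subst hmx
    simp at hn
  | some mx =>
  cases hmn : PySem.List.min? l (fun x => x) with
  | none =>
    rw [PySem.List.min?_eq_none_iff] at hmn
    subst hmn
    simp at hn
  | some mn =>
  obtain ⟨u, hs⟩ := pvSorted_decomp l mx mn hmx hmn (by omega)
  have hmxl : mx ∈ l := PySem.List.max?_mem hmx
  have hcount : ∀ w, l.count w = (mn :: u ++ [mx]).count w := fun w => by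
    rw [← hs]
    exact ((PySem.List.sorted_perm l (fun x => x) false).count_eq w).symm
  have hu2 : u.length + 2 = l.length := by
    have := PySem.List.length_sorted l (fun x => x) false
    rw [hs] at this
    simp at this
    omega
  have hmnl1 : mn ∈ l.erase mx := by
    rw [← List.count_pos_iff, List.count_erase]
    have h1 := hcount mn
    simp only [List.count_cons, List.count_append, List.count_singleton, List.count_nil,
      beq_iff_eq] at h1 ⊢
    split_ifs at h1 ⊢ <;> simp_all <;> omega
  have h1 : PySem.List.remove? l mx = some (l.erase mx) :=
    PySem.List.remove?_eq_some_erase l mx hmxl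
  have h2 : PySem.List.remove? (l.erase mx) mn = some ((l.erase mx).erase mn) :=
    PySem.List.remove?_eq_some_erase (l.erase mx) mn hmnl1
  have hlen2 : ((l.erase mx).erase mn).length = l.length - 2 := by
    rw [List.length_erase_of_mem hmnl1, List.length_erase_of_mem hmxl]
    omega
  -- count bounds for the two erasures
  have hmidf := pvMid_formula l mx mn u hs hn
  have hmid_sub : (pvMid l).Sublist u := by
    rw [hmidf]
    exact (List.take_sublist _ _).trans (List.drop_sublist _ _)
  have hcntu : ∀ w, (pvMid l).count w ≤ u.count w := fun w => List.Sublist.count_le w hmid_sub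
  have hkeep1 : pvKeepQ (pvCnt (pvMid l)) (l.erase mx) = pvKeepQ (pvCnt (pvMid l)) l := by
    apply pvKeepQ_erase
    have hx1 := hcount mx
    have hx2 := hcntu mx
    simp only [List.count_cons, List.count_append, List.count_singleton, List.count_nil,
      beq_iff_eq] at hx1
    unfold pvCnt
    split_ifs at hx1 <;> push_cast <;> omega
  have hkeep2 : pvKeepQ (pvCnt (pvMid l)) ((l.erase mx).erase mn) =
      pvKeepQ (pvCnt (pvMid l)) (l.erase mx) := by
    apply pvKeepQ_erase
    have hx1 := hcount mn
    have hx2 := hcntu mn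
    rw [List.count_erase]
    simp only [List.count_cons, List.count_append, List.count_singleton, List.count_nil,
      beq_iff_eq] at hx1 ⊢
    unfold pvCnt
    split_ifs at hx1 ⊢ <;> push_cast <;> simp_all <;> omega
  have hperm2 : ((l.erase mx).erase mn).Perm u := pvErase_perm l mx mn u hs
  -- unfold one iteration of the loop
  rw [calcPairLoop, if_pos hn]
  split
  · next heq => rw [hmx] at heq; cases heq
  · next mxv heq =>
    rw [hmx] at heq
    injection heq with heq
    subst heq
    split
    · next heq' => rw [hmn] at heq'; cases heq'
    · next mnv heq' =>
      rw [hmn] at heq'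
      injection heq' with heq'
      subst heq'
      split
      · next heq1 => rw [h1] at heq1; cases heq1
      · next l1 heq1 =>
        rw [h1] at heq1
        injection heq1 with heq1
        subst heq1
        split
        · next heq2 => rw [h2] at heq2; cases heq2
        · next l2 heq2 =>
          rw [h2] at heq2
          injection heq2 with heq2
          subst heq2
          -- now the three outcomes
          by_cases hc1 : ((l.erase mx).erase mn).length = 1
          · rw [if_pos hc1]
            have hmu : pvMid l = u := by
              rw [hmidf]
              have : (l.length - 1) / 2 = 1 := by omega
              rw [this]
              simp only [Nat.sub_self]
              rw [List.drop_zero]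
              exact List.take_of_length_le (by omega)
            have hall : pvKeepQ (pvCnt (pvMid l)) ((l.erase mx).erase mn) =
                (l.erase mx).erase mn := by
              apply pvKeepQ_all
              intro w
              unfold pvCnt
              rw [hmu, hperm2.count_eq w]
            rw [← hkeep1, ← hkeep2, hall]
            unfold pvFin
            rw [if_pos hc1]
          · by_cases hc2 : ((l.erase mx).erase mn).length = 2
            · rw [if_neg hc1, if_pos hc2]
              have hmu : pvMid l = u := by
                rw [hmidf]
                have : (l.length - 1) / 2 = 1 := by omega
                rw [this]
                simp only [Nat.sub_self]
                rw [List.drop_zero]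
                exact List.take_of_length_le (by omega)
              have hall : pvKeepQ (pvCnt (pvMid l)) ((l.erase mx).erase mn) =
                  (l.erase mx).erase mn := by
                apply pvKeepQ_all
                intro w
                unfold pvCnt
                rw [hmu, hperm2.count_eq w]
              rw [← hkeep1, ← hkeep2, hall]
              unfold pvFin
              rw [if_neg (by omega)]
            · rw [if_neg hc1, if_neg hc2]
              have hrec := IH (l.length - 2) (by omega) ((l.erase mx).erase mn) hlen2
                (by omega)
              rw [hrec]
              have hs2 : PySem.List.sorted ((l.erase mx).erase mn) (fun x => x) = u :=
                pvSorted_erase l mx mn u hs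
              have hmideq : pvMid ((l.erase mx).erase mn) = pvMid l := by
                rw [hmidf]
                unfold pvMid
                rw [hs2, hlen2]
                have e1 : (l.length - 2 - 1) / 2 = (l.length - 1) / 2 - 1 := by omega
                rw [e1]
                have e2 : l.length - 2 - ((l.length - 1) / 2 - 1) - ((l.length - 1) / 2 - 1) =
                    l.length - (l.length - 1) / 2 - (l.length - 1) / 2 := by omega
                rw [e2]
              rw [hmideq, ← hkeep1, ← hkeep2]

theorem pvAlt_eq (l : List Int) (h : 2 < l.length) :
    calc_pair_divisors_alt l = some (pvFin (pvKeepQ (pvCnt (pvMid l)) l)) := by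
  have hn3 : ¬ (PySem.List.len l < 3) := by
    rw [PySem.List.len_eq]
    omega
  have hfd : PySem.Int.floordiv (PySem.List.len l - 1) 2 = (((l.length - 1) / 2 : Nat) : Int) := by
    rw [PySem.List.len_eq]
    rw [show ((l.length : Int) - 1) = ((l.length - 1 : Nat) : Int) by omega]
    exact_mod_cast PySem.Int.floordiv_natCast (l.length - 1) 2
  simp only [calc_pair_divisors_alt, hn3, if_false, hfd]
  have hub : PySem.List.len l - (((l.length - 1) / 2 : Nat) : Int) =
      ((l.length - (l.length - 1) / 2 : Nat) : Int) := by
    rw [PySem.List.len_eq]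
    have : (l.length - 1) / 2 ≤ l.length := by omega
    omega
  rw [hub, PySem.List.slice_natCast]
  have hmid : List.take (l.length - (l.length - 1) / 2 - (l.length - 1) / 2)
      (List.drop ((l.length - 1) / 2) (PySem.List.sorted l (fun x => x))) = pvMid l := rfl
  rw [hmid]
  rw [PySem.Dict.foldl_insert_getD_add_one_eq_counter]
  rw [pvFold_eq l.reverse (PySem.Dict.counter (pvMid l)) [] (pvCnt (pvMid l))
    (fun v => by rw [PySem.Dict.getD_counter]; rfl)]
  rw [List.nil_append, pvRevSel_reverse, List.reverse_reverse]
  unfold pvFin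
  split_ifs <;> rfl

-- ===== VERDICT (by name: the statement is the Claim_ definition above) =====
theorem calc_pair_divisors_spec : Claim_equal_calc_pair_divisors := by
  intro l _
  unfold Spec_calc_pair_divisors calc_pair_divisors
  by_cases h : 2 < l.length
  · rw [pvLoopA_eq l.length l rfl h, pvAlt_eq l h]
  · rw [calcPairLoop, if_neg (by omega)]
    unfold calc_pair_divisors_alt
    rw [if_pos (by simp [PySem.List.len_eq]; omega)]
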